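-- pv_equiv track=rewrite | github.com/copp1723/swarm | services/orchestrator_service.py | _select_secondary_agents
-- ===== SOURCE A (Python) =====
-- from typing import Dict, List, Any, Optional, Tuple
--
-- def _select_secondary_agents(primary: List[str], intent: str) -> List[str]:
--     """Select secondary/backup agents"""
--     all_agents = ["coding_01", "bug_01", "product_01", "general_01"]
--
--     # Secondary agents are those not in primary
--     secondary = [a for a in all_agents if a not in primary]
--
--     # Prioritize based on intent
--     if intent == "bug_fixing":
--         secondary.sort(key=lambda x: 0 if x == "coding_01" else 1)
--     elif intent == "code_development":
--         secondary.sort(key=lambda x: 0 if x == "bug_01" else 1)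
--
--     return secondary[:2]
-- ===== SOURCE B (Python) =====
-- def _select_secondary_agents(primary, intent):
--     """Select secondary/backup agents.
--
--     Instead of filtering then stable-sorting, the intent's priority is baked
--     into a precomputed traversal order; one early-exit scan collects the
--     first two agents not already in primary.
--     """
--     ORDERS = {
--         "bug_fixing": ["coding_01", "bug_01", "product_01", "general_01"],
--         "code_development": ["bug_01", "coding_01", "product_01", "general_01"],
--     }
--     order = ORDERS.get(intent, ["coding_01", "bug_01", "product_01", "general_01"])
--     result = []
--     for a in order:
--         if a not in primary:
--             result.append(a)
--             if len(result) == 2: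
--                 break
--     return result
-- ===== Notes on version B (the rewrite author's own statement) =====
-- stated objective: alternative
-- what changed: Eliminates the filter-then-stable-sort-then-slice pipeline: the intent's priority is precomputed as a per-intent traversal order (a table of full orderings), and a single early-exit scan over that order collects the first two agents not in primary.
import Mathlib
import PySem

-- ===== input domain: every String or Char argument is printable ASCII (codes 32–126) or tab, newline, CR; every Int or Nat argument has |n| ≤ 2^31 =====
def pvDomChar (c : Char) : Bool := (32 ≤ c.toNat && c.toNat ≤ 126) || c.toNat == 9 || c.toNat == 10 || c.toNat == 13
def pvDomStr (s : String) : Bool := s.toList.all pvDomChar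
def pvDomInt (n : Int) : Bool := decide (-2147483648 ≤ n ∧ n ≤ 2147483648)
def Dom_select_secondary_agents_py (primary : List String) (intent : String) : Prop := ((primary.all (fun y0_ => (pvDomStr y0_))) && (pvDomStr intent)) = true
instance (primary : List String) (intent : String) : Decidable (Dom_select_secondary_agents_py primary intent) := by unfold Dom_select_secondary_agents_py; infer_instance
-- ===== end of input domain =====

-- B replaces filter + stable sort + slice by a per-intent traversal-order table and one early-exit scan; same value everywhere.
-- ===== PORT A =====
def select_secondary_agents_py (primary : List String) (intent : String) : List String :=
  let all_agents : List String := ["coding_01", "bug_01", "product_01", "general_01"]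
  let secondary := all_agents.filter (fun a => !(primary.contains a))
  let secondary :=
    if intent = "bug_fixing" then
      PySem.List.sorted secondary (fun x => if x = "coding_01" then (0 : Int) else 1)
    else if intent = "code_development" then
      PySem.List.sorted secondary (fun x => if x = "bug_01" then (0 : Int) else 1)
    else secondary
  PySem.List.slice secondary none (some 2)

-- ===== PORT B =====
-- the 'for a in order: … break' loop of Source B, as structural recursion over the order list
def pvScanTwo (order : List String) (primary : List String) (result : List String) : List String :=
  match order with
  | [] => result
  | a :: rest =>
    if !(primary.contains a) then
      let result := result ++ [a]
      if result.length = 2 then result else pvScanTwo rest primary result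
    else pvScanTwo rest primary result

def select_secondary_agents_py_alt (primary : List String) (intent : String) : List String :=
  let orders : PySem.Dict String (List String) := PySem.Dict.ofList
    [("bug_fixing", ["coding_01", "bug_01", "product_01", "general_01"]),
     ("code_development", ["bug_01", "coding_01", "product_01", "general_01"])]
  let order := orders.getD intent ["coding_01", "bug_01", "product_01", "general_01"]
  pvScanTwo order primary []

-- ===== PRECONDITION & SPEC =====
def Spec_select_secondary_agents_py (primary : List String) (intent : String) (out : List String) : Prop := out = select_secondary_agents_py_alt primary intent
instance (primary : List String) (intent : String) (out : List String) : Decidable (Spec_select_secondary_agents_py primary intent out) := by unfold Spec_select_secondary_agents_py; infer_instance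

-- ===== CLAIM (what is proved, stated in full; the proofs are below) =====
def Claim_equal_select_secondary_agents_py : Prop := ∀ (primary : List String) (intent : String), Dom_select_secondary_agents_py primary intent → Spec_select_secondary_agents_py primary intent (select_secondary_agents_py primary intent)

-- ===== LEMMAS AND PROOFS =====

-- ===== VERDICT (by name: the statement is the Claim_ definition above) =====
theorem select_secondary_agents_py_spec : Claim_equal_select_secondary_agents_py := by
  intro primary intent _
  unfold Spec_select_secondary_agents_py select_secondary_agents_py select_secondary_agents_py_alt
  by_cases h1 : intent = "bug_fixing"
  · subst h1
    by_cases hc1 : "coding_01" ∈ primary <;>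
    by_cases hc2 : "bug_01" ∈ primary <;>
    by_cases hc3 : "product_01" ∈ primary <;>
    by_cases hc4 : "general_01" ∈ primary <;>
    simp [List.filter, pvScanTwo, hc1, hc2, hc3, hc4, PySem.Dict.getD, PySem.Dict.get?,
          PySem.Dict.ofList, PySem.Dict.update, PySem.Dict.empty, PySem.Dict.insert] <;> rfl
  · by_cases h2 : intent = "code_development"
    · subst h2
      by_cases hc1 : "coding_01" ∈ primary <;>
      by_cases hc2 : "bug_01" ∈ primary <;>
      by_cases hc3 : "product_01" ∈ primary <;>
      by_cases hc4 : "general_01" ∈ primary <;>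
      simp [List.filter, pvScanTwo, hc1, hc2, hc3, hc4, PySem.Dict.getD, PySem.Dict.get?,
          PySem.Dict.ofList, PySem.Dict.update, PySem.Dict.empty, PySem.Dict.insert] <;> rfl
    · have hb1 : (("bug_fixing" : String) == intent) = false := by
        simp only [beq_eq_false_iff_ne]; exact fun h => h1 h.symm
      have hb2 : (("code_development" : String) == intent) = false := by
        simp only [beq_eq_false_iff_ne]; exact fun h => h2 h.symm
      by_cases hc1 : "coding_01" ∈ primary <;>
      by_cases hc2 : "bug_01" ∈ primary <;>
      by_cases hc3 : "product_01" ∈ primary <;>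
      by_cases hc4 : "general_01" ∈ primary <;>
      simp [List.filter, pvScanTwo, hc1, hc2, hc3, hc4, h1, h2, PySem.Dict.getD, PySem.Dict.get?,
            PySem.Dict.ofList, PySem.Dict.update, PySem.Dict.empty, PySem.Dict.insert,
            hb1, hb2] <;> rfl
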